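-- pv_equiv track=rewrite | github.com/alexey-goloburdin/botanim-bot | botanim_bot/schulze.py | _rank_p
-- ===== SOURCE A (Python) =====
-- from collections import defaultdict
--
-- def _rank_p(candidates, p):
--     """Ranks the candidates by p."""
--     candidate_wins = defaultdict(list)
--
--     for candidate_1 in candidates:
--         num_wins = 0
--
--         # Compute the number of wins this candidate has over all other candidates.
--         for candidate_2 in candidates:
--             if candidate_1 == candidate_2:
--                 continue
--             candidate1_score = p.get((candidate_1, candidate_2), 0)
--             candidate2_score = p.get((candidate_2, candidate_1), 0)
--             if candidate1_score > candidate2_score: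
--                 num_wins += 1
--
--         candidate_wins[num_wins].append(candidate_1)
--
--     sorted_wins = sorted(candidate_wins.keys(), reverse=True)
--     return [candidate_wins[num_wins] for num_wins in sorted_wins]
-- ===== SOURCE B (Python) =====
-- def _rank_p(candidates, p):
--     """Ranks the candidates by p."""
--     n = len(candidates)
--     wins = [0] * n
--     # One triangular sweep: each unordered pair is compared once and the win
--     # is credited to whichever side prevails.
--     for i in range(n):
--         for j in range(i + 1, n):
--             a, b = candidates[i], candidates[j]
--             if a == b:
--                 continue
--             score_ab = p.get((a, b), 0)
--             score_ba = p.get((b, a), 0)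
--             if score_ab > score_ba:
--                 wins[i] += 1
--             elif score_ba > score_ab:
--                 wins[j] += 1
--     levels = sorted(set(wins), reverse=True)
--     return [[candidates[i] for i in range(n) if wins[i] == v] for v in levels]
-- ===== Notes on version B (the rewrite author's own statement) =====
-- stated objective: faster
-- what changed: A rescans all candidates per candidate (n^2 ordered comparisons) and buckets into a defaultdict keyed by win count, then sorts the keys; B makes one triangular sweep over the n(n-1)/2 unordered index pairs, comparing each pair once and crediting the win to whichever side prevails in a per-index array (handling duplicates by index), then lists the distinct counts descending and emits each group by one pass over the indices - no dict at all.
import Mathlib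
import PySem

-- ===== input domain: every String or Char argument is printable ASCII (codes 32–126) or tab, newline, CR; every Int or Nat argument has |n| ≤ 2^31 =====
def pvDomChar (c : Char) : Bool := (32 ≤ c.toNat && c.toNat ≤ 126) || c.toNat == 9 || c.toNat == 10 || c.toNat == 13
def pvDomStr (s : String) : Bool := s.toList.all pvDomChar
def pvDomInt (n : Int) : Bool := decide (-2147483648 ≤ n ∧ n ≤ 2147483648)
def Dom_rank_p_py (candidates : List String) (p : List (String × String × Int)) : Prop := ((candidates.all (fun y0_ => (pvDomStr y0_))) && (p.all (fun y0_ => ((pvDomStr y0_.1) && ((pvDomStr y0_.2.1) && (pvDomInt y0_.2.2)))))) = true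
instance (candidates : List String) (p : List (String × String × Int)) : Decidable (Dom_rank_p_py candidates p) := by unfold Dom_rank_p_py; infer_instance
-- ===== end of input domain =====

-- B replaces A's per-candidate rescans + defaultdict bucketing + key sort by a single triangular
-- sweep over unordered index pairs crediting a per-index win array, then one pass per distinct
-- count, descending (objective: faster — each pair compared once instead of twice, no dict).

-- shared primitive: p.get((a, b), 0) — first-match lookup in the association list (dict convention)
def pvPGet (p : List (String × String × Int)) (a b : String) : Int :=
  match p with
  | [] => 0
  | (x, y, v) :: rest => if x = a ∧ y = b then v else pvPGet rest a b

-- ===== PORT A =====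
def rank_p_py (candidates : List String) (p : List (String × String × Int)) : List (List String) :=
  let d := candidates.foldl (fun d c1 =>
      let numWins := candidates.foldl (fun n c2 =>
        if c1 = c2 then n
        else if pvPGet p c1 c2 > pvPGet p c2 c1 then n + 1 else n) (0 : Int)
      d.modify numWins [] (fun l => l ++ [c1])) PySem.Dict.empty
  (PySem.List.sorted d.keys (fun x => x) true).map (fun w => d.getD w [])

-- ===== PORT B =====
-- wins[i] += 1 on an in-range nonnegative index: pySetD/pyGetD are exact there
def rank_p_py_alt (candidates : List String) (p : List (String × String × Int)) : List (List String) :=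
  let n : Int := (candidates.length : Int)
  let wins : List Int :=
    (PySem.List.pyRange 0 n 1).foldl (fun wins i =>
      (PySem.List.pyRange (i + 1) n 1).foldl (fun wins j =>
        let a := PySem.List.pyGetD candidates i ""
        let b := PySem.List.pyGetD candidates j ""
        if a = b then wins
        else
          let score_ab := pvPGet p a b
          let score_ba := pvPGet p b a
          if score_ab > score_ba then PySem.List.pySetD wins i (PySem.List.pyGetD wins i 0 + 1)
          else if score_ba > score_ab then PySem.List.pySetD wins j (PySem.List.pyGetD wins j 0 + 1)
          else wins) wins) (List.replicate n.toNat (0 : Int))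
  let levels := PySem.List.sorted (PySem.Set.ofList wins) (fun x => x) true
  levels.map (fun v =>
    ((PySem.List.pyRange 0 n 1).filter (fun i => PySem.List.pyGetD wins i 0 == v)).map
      (fun i => PySem.List.pyGetD candidates i ""))

-- ===== PRECONDITION & SPEC =====
def Spec_rank_p_py (candidates : List String) (p : List (String × String × Int)) (out : List (List String)) : Prop := out = rank_p_py_alt candidates p
instance (candidates : List String) (p : List (String × String × Int)) (out : List (List String)) : Decidable (Spec_rank_p_py candidates p out) := by unfold Spec_rank_p_py; infer_instance

-- ===== CLAIM (what is proved, stated in full; the proofs are below) =====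
def Claim_equal_rank_p_py : Prop := ∀ (candidates : List String) (p : List (String × String × Int)), Dom_rank_p_py candidates p → Spec_rank_p_py candidates p (rank_p_py candidates p)

-- ===== LEMMAS AND PROOFS =====

-- 'candidate c beats candidate o' — the comparison both programs make
def pvBeat (p : List (String × String × Int)) (a b : String) : Bool :=
  !(b == a) && decide (pvPGet p a b > pvPGet p b a)

-- A's per-candidate win count
def pvWinsB (candidates : List String) (p : List (String × String × Int)) (c : String) : Int :=
  ((candidates.countP (fun o => pvBeat p c o) : Nat) : Int)

-- candidates[i] for an index coming from range(n)
def pvG (cs : List String) (i : Int) : String := PySem.List.pyGetD cs i ""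

-- the body of B's pair loop, as a function of the pair
def pvStep (cs : List String) (p : List (String × String × Int)) (ws : List Int) (pr : Int × Int) : List Int :=
  if pvBeat p (pvG cs pr.1) (pvG cs pr.2) then PySem.List.pySetD ws pr.1 (PySem.List.pyGetD ws pr.1 0 + 1)
  else if pvBeat p (pvG cs pr.2) (pvG cs pr.1) then PySem.List.pySetD ws pr.2 (PySem.List.pyGetD ws pr.2 0 + 1)
  else ws

-- 'this pair credits index t'
def pvHit (cs : List String) (p : List (String × String × Int)) (t : Int) (pr : Int × Int) : Bool :=
  (pr.1 == t && pvBeat p (pvG cs pr.1) (pvG cs pr.2)) || (pr.2 == t && pvBeat p (pvG cs pr.2) (pvG cs pr.1))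

-- B's triangular pair list
def pvPairs (n : Int) : List (Int × Int) :=
  (PySem.List.pyRange 0 n 1).flatMap (fun i => (PySem.List.pyRange (i + 1) n 1).map (fun j => (i, j)))

theorem pv_beat_asymm (p : List (String × String × Int)) (a b : String)
    (h : pvBeat p a b = true) : pvBeat p b a = false := by
  simp only [pvBeat, Bool.and_eq_true, decide_eq_true_eq] at h
  simp only [pvBeat, Bool.and_eq_false_iff, decide_eq_false_iff_not]
  obtain ⟨-, h2⟩ := h
  right; omega

theorem pv_beat_irrefl (p : List (String × String × Int)) (a : String) : pvBeat p a a = false := by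
  simp [pvBeat]

-- B's nested loops are the fold of pvStep over the triangular pair list
theorem pv_fold_flatten (cs : List String) (p : List (String × String × Int)) (n : Int) (init : List Int) :
    (PySem.List.pyRange 0 n 1).foldl (fun wins i =>
      (PySem.List.pyRange (i + 1) n 1).foldl (fun wins j =>
        let a := PySem.List.pyGetD cs i ""
        let b := PySem.List.pyGetD cs j ""
        if a = b then wins
        else
          let score_ab := pvPGet p a b
          let score_ba := pvPGet p b a
          if score_ab > score_ba then PySem.List.pySetD wins i (PySem.List.pyGetD wins i 0 + 1)
          else if score_ba > score_ab then PySem.List.pySetD wins j (PySem.List.pyGetD wins j 0 + 1)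
          else wins) wins) init
    = (pvPairs n).foldl (pvStep cs p) init := by
  rw [pvPairs, List.foldl_flatMap]
  congr 1
  funext ws i
  rw [List.foldl_map]
  congr 1
  funext ws' j
  show (if PySem.List.pyGetD cs i "" = PySem.List.pyGetD cs j "" then ws'
    else if pvPGet p (PySem.List.pyGetD cs i "") (PySem.List.pyGetD cs j "") > pvPGet p (PySem.List.pyGetD cs j "") (PySem.List.pyGetD cs i "") then PySem.List.pySetD ws' i (PySem.List.pyGetD ws' i 0 + 1)
    else if pvPGet p (PySem.List.pyGetD cs j "") (PySem.List.pyGetD cs i "") > pvPGet p (PySem.List.pyGetD cs i "") (PySem.List.pyGetD cs j "") then PySem.List.pySetD ws' j (PySem.List.pyGetD ws' j 0 + 1)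
    else ws') = pvStep cs p ws' (i, j)
  simp only [pvStep, pvG]
  set a := PySem.List.pyGetD cs i "" with ha
  set b := PySem.List.pyGetD cs j "" with hb
  by_cases hab : a = b
  · simp [hab, pv_beat_irrefl]
  · have hba : (b == a) = false := beq_eq_false_iff_ne.mpr (fun e => hab e.symm)
    have hab' : (a == b) = false := beq_eq_false_iff_ne.mpr hab
    by_cases h1 : pvPGet p a b > pvPGet p b a
    · simp [pvBeat, hab, hba, h1]
    · by_cases h2 : pvPGet p b a > pvPGet p a b
      · simp [pvBeat, hab, hba, hab', h1, h2]
      · simp [pvBeat, hab, hba, hab', h1, h2]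

theorem pv_length_fold (cs : List String) (p : List (String × String × Int)) :
    ∀ (P : List (Int × Int)) (ws : List Int), (P.foldl (pvStep cs p) ws).length = ws.length := by
  intro P
  induction P with
  | nil => intro ws; rfl
  | cons pr P ih =>
    intro ws
    rw [List.foldl_cons, ih]
    unfold pvStep
    split_ifs <;> simp [PySem.List.length_pySetD]

-- the fold counts, for every index t, the pairs that credit t
theorem pv_getD_fold (cs : List String) (p : List (String × String × Int)) :
    ∀ (P : List (Int × Int)) (ws : List Int) (t : Nat),
      (∀ pr ∈ P, 0 ≤ pr.1 ∧ pr.1 < (ws.length : Int) ∧ 0 ≤ pr.2 ∧ pr.2 < (ws.length : Int)) →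
      PySem.List.pyGetD (P.foldl (pvStep cs p) ws) (t : Int) 0
        = PySem.List.pyGetD ws (t : Int) 0 + (P.countP (pvHit cs p (t : Int)) : Int) := by
  intro P
  induction P with
  | nil => intro ws t _; simp
  | cons pr P ih =>
    intro ws t h
    obtain ⟨hi0, hi1, hj0, hj1⟩ := h pr (List.mem_cons_self)
    obtain ⟨iN, jN⟩ := pr
    simp only at hi0 hi1 hj0 hj1
    obtain ⟨i, rfl⟩ : ∃ k : Nat, iN = (k : Int) := ⟨iN.toNat, (Int.toNat_of_nonneg hi0).symm⟩
    obtain ⟨j, rfl⟩ : ∃ k : Nat, jN = (k : Int) := ⟨jN.toNat, (Int.toNat_of_nonneg hj0).symm⟩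
    have hiN : i < ws.length := by exact_mod_cast hi1
    have hjN : j < ws.length := by exact_mod_cast hj1
    have hbounds : ∀ pr ∈ P, 0 ≤ pr.1 ∧ pr.1 < ((pvStep cs p ws ((i : Int), (j : Int))).length : Int) ∧
        0 ≤ pr.2 ∧ pr.2 < ((pvStep cs p ws ((i : Int), (j : Int))).length : Int) := by
      intro q hq
      have hlen : (pvStep cs p ws ((i : Int), (j : Int))).length = ws.length := by
        unfold pvStep; split_ifs <;> simp
      rw [hlen]
      exact h q (List.mem_cons_of_mem _ hq)
    rw [List.foldl_cons, List.countP_cons, ih _ t hbounds]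
    have hstep : PySem.List.pyGetD (pvStep cs p ws ((i : Int), (j : Int))) (t : Int) 0
        = PySem.List.pyGetD ws (t : Int) 0 + (if pvHit cs p (t : Int) ((i : Int), (j : Int)) then 1 else 0) := by
      unfold pvStep pvHit
      simp only
      by_cases hb1 : pvBeat p (pvG cs (i : Int)) (pvG cs (j : Int)) = true
      · rw [if_pos hb1, PySem.List.pyGetD_pySetD_natCast ws i t _ 0 hiN]
        by_cases hti : t = i
        · subst hti
          simp [hb1]
        · have hne : ((i : Int) == (t : Int)) = false := by
            refine beq_eq_false_iff_ne.mpr ?_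
            exact_mod_cast fun e => hti (by omega)
          rw [if_neg hti]
          simp [hne, pv_beat_asymm _ _ _ hb1]
      · rw [if_neg hb1]
        by_cases hb2 : pvBeat p (pvG cs (j : Int)) (pvG cs (i : Int)) = true
        · rw [if_pos hb2, PySem.List.pyGetD_pySetD_natCast ws j t _ 0 hjN]
          by_cases htj : t = j
          · subst htj
            simp [hb2]
          · have hne : ((j : Int) == (t : Int)) = false := by
              refine beq_eq_false_iff_ne.mpr ?_
              exact_mod_cast fun e => htj (by omega)
            rw [if_neg htj]
            simp [hne, Bool.eq_false_iff.mpr hb1]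
        · simp [Bool.eq_false_iff.mpr hb1, Bool.eq_false_iff.mpr hb2]
    rw [hstep]
    split_ifs <;> push_cast <;> ring

-- counting 'j == t && C j' over a duplicate-free list
theorem pv_countP_single (l : List Int) (hl : l.Nodup) (t : Int) (C : Int → Bool) :
    l.countP (fun j => (j == t) && C j) = if t ∈ l ∧ C t then 1 else 0 := by
  induction l with
  | nil => simp
  | cons a l ih =>
    obtain ⟨ha, hl'⟩ := List.nodup_cons.mp hl
    rw [List.countP_cons, ih hl']
    by_cases hat : a = t
    · subst hat
      simp [ha, List.mem_cons]
    · have h1 : (a == t) = false := beq_eq_false_iff_ne.mpr hat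
      have h2 : ¬ t = a := fun e => hat e.symm
      simp [h1, List.mem_cons, h2]

-- the triangular pairs crediting t are exactly A's comparisons won by candidate t
theorem pv_pairs_count (cs : List String) (p : List (String × String × Int)) (t : Nat) (ht : t < cs.length) :
    (pvPairs (cs.length : Int)).countP (pvHit cs p (t : Int))
      = cs.countP (fun o => pvBeat p (pvG cs (t : Int)) o) := by
  have htI : ((t : Int)) < (cs.length : Int) := by exact_mod_cast ht
  have hsplit : PySem.List.pyRange 0 (cs.length : Int) 1
      = PySem.List.pyRange 0 (t : Int) 1 ++ (t : Int) :: PySem.List.pyRange ((t : Int) + 1) (cs.length : Int) 1 := by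
    rw [PySem.List.pyRange_one_append 0 (t : Int) (cs.length : Int) (by positivity) (le_of_lt htI),
      PySem.List.pyRange_one_cons htI]
  have hrhs : ∀ ct : String, (PySem.List.pyRange 0 (cs.length : Int) 1).countP (fun i => pvBeat p ct (pvG cs i))
      = cs.countP (fun o => pvBeat p ct o) := by
    intro ct
    conv_rhs => rw [← PySem.List.map_pyGetD_pyRange_zero' cs ""]
    rw [List.countP_map]
    rfl
  rw [pvPairs, List.countP_flatMap, ← hrhs (pvG cs (t : Int)), hsplit, List.map_append,
    List.map_cons, List.sum_append, List.sum_cons, List.countP_append, List.countP_cons]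
  simp only [Function.comp_apply]
  have hpart1 : ((PySem.List.pyRange 0 (t : Int) 1).map
        (List.countP (pvHit cs p (t : Int)) ∘ fun i => (PySem.List.pyRange (i + 1) (cs.length : Int) 1).map (fun j => (i, j)))).sum
      = (PySem.List.pyRange 0 (t : Int) 1).countP (fun i => pvBeat p (pvG cs (t : Int)) (pvG cs i)) := by
    rw [← PySem.List.sum_map_ite_one_zero_nat]
    refine congrArg List.sum (List.map_congr_left ?_)
    intro i hi
    obtain ⟨hi0, hi1⟩ := (PySem.List.mem_pyRange_one).mp hi
    simp only [Function.comp_apply, List.countP_map]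
    have hfalse : (i == (t : Int)) = false := beq_eq_false_iff_ne.mpr (by omega)
    have hcong : ((pvHit cs p (t : Int)) ∘ fun j => (i, j))
        = fun j => (j == (t : Int)) && pvBeat p (pvG cs j) (pvG cs i) := by
      funext j
      simp [pvHit, hfalse]
    rw [hcong, pv_countP_single _ (PySem.List.nodup_pyRange_one _ _) _ _]
    have hmem : (t : Int) ∈ PySem.List.pyRange (i + 1) (cs.length : Int) 1 :=
      (PySem.List.mem_pyRange_one).mpr ⟨by omega, htI⟩
    simp [hmem]
  have hhead : List.countP (pvHit cs p (t : Int))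
        ((PySem.List.pyRange ((t : Int) + 1) (cs.length : Int) 1).map (fun j => ((t : Int), j)))
      = (PySem.List.pyRange ((t : Int) + 1) (cs.length : Int) 1).countP (fun j => pvBeat p (pvG cs (t : Int)) (pvG cs j)) := by
    rw [List.countP_map]
    refine List.countP_congr ?_
    intro j hj
    obtain ⟨hj0, hj1⟩ := (PySem.List.mem_pyRange_one).mp hj
    have hfalse : (j == (t : Int)) = false := beq_eq_false_iff_ne.mpr (by omega)
    simp [pvHit, hfalse]
  have hpart3 : ((PySem.List.pyRange ((t : Int) + 1) (cs.length : Int) 1).map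
        (List.countP (pvHit cs p (t : Int)) ∘ fun i => (PySem.List.pyRange (i + 1) (cs.length : Int) 1).map (fun j => (i, j)))).sum = 0 := by
    refine List.sum_eq_zero_iff_forall_eq_nat.mpr ?_
    intro x hx
    obtain ⟨i, hi, rfl⟩ := List.mem_map.mp hx
    obtain ⟨hi0, hi1⟩ := (PySem.List.mem_pyRange_one).mp hi
    simp only [Function.comp_apply, List.countP_map]
    have hfalse : (i == (t : Int)) = false := beq_eq_false_iff_ne.mpr (by omega)
    have hcong : ((pvHit cs p (t : Int)) ∘ fun j => (i, j))
        = fun j => (j == (t : Int)) && pvBeat p (pvG cs j) (pvG cs i) := by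
      funext j
      simp [pvHit, hfalse]
    rw [hcong, pv_countP_single _ (PySem.List.nodup_pyRange_one _ _) _ _]
    have hmem : (t : Int) ∉ PySem.List.pyRange (i + 1) (cs.length : Int) 1 := by
      intro hmem
      obtain ⟨h1, h2⟩ := (PySem.List.mem_pyRange_one).mp hmem
      omega
    simp [hmem]
  rw [hpart1, hhead, hpart3, pv_beat_irrefl]
  simp

theorem pv_getD_replicate (m : Nat) (t : Int) :
    PySem.List.pyGetD (List.replicate m (0 : Int)) t 0 = 0 := by
  simp only [PySem.List.pyGetD, PySem.List.pyGet?, PySem.List.pyIdx?]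
  split_ifs <;> simp [List.getElem?_replicate] <;> split_ifs <;> simp

-- B's wins array is A's win count, candidate by candidate
theorem pv_wins_eq_map (cs : List String) (p : List (String × String × Int)) :
    (pvPairs (cs.length : Int)).foldl (pvStep cs p) (List.replicate cs.length (0 : Int))
      = cs.map (pvWinsB cs p) := by
  have hlen : ((pvPairs (cs.length : Int)).foldl (pvStep cs p) (List.replicate cs.length (0 : Int))).length = cs.length := by
    rw [pv_length_fold, List.length_replicate]
  have hbounds : ∀ pr ∈ pvPairs (cs.length : Int),
      0 ≤ pr.1 ∧ pr.1 < ((List.replicate cs.length (0 : Int)).length : Int) ∧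
      0 ≤ pr.2 ∧ pr.2 < ((List.replicate cs.length (0 : Int)).length : Int) := by
    intro pr hpr
    rw [List.length_replicate]
    obtain ⟨i, hi, hpr'⟩ := List.mem_flatMap.mp hpr
    obtain ⟨j, hj, rfl⟩ := List.mem_map.mp hpr'
    obtain ⟨hi0, hi1⟩ := (PySem.List.mem_pyRange_one).mp hi
    obtain ⟨hj0, hj1⟩ := (PySem.List.mem_pyRange_one).mp hj
    exact ⟨hi0, hi1, by omega, hj1⟩
  apply List.ext_getElem
  · rw [hlen, List.length_map]
  · intro k h1 h2
    have hk : k < cs.length := by rwa [hlen] at h1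
    have hkI : (k : Int) < ((List.replicate cs.length (0 : Int)).length : Int) := by
      rw [List.length_replicate]; exact_mod_cast hk
    have hget : ((pvPairs (cs.length : Int)).foldl (pvStep cs p) (List.replicate cs.length (0 : Int)))[k]
        = PySem.List.pyGetD ((pvPairs (cs.length : Int)).foldl (pvStep cs p) (List.replicate cs.length (0 : Int))) (k : Int) 0 := by
      rw [PySem.List.pyGetD_eq_getElem _ 0 (by positivity) (by rw [hlen]; exact_mod_cast hk)]
      simp
    rw [hget, pv_getD_fold cs p _ _ k hbounds, pv_getD_replicate, pv_pairs_count cs p k hk, zero_add]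
    rw [List.getElem_map]
    have hgk : pvG cs (k : Int) = cs[k] := by
      rw [pvG, PySem.List.pyGetD_eq_getElem cs "" (by positivity) (by exact_mod_cast hk)]
      simp
    rw [pvWinsB, hgk]

-- A's inner loop equals the win-count function
theorem pv_wins_eq (candidates : List String) (p : List (String × String × Int)) (c1 : String) :
    candidates.foldl (fun n c2 =>
        if c1 = c2 then n
        else if pvPGet p c1 c2 > pvPGet p c2 c1 then n + 1 else n) (0 : Int)
      = pvWinsB candidates p c1 := by
  have hf : (fun (n : Int) c2 =>
      if c1 = c2 then n
      else if pvPGet p c1 c2 > pvPGet p c2 c1 then n + 1 else n)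
      = (fun (n : Int) c2 => if pvBeat p c1 c2 = true then n + 1 else n) := by
    funext n c2
    by_cases h : c1 = c2
    · subst h; simp [pvBeat]
    · have h2 : (c2 == c1) = false := by simp [Ne.symm h]
      simp [if_neg h, pvBeat, h2]
  rw [hf, PySem.List.foldl_count_if, pvWinsB, zero_add]

-- A's bucket at v is the subsequence of candidates with win count v
theorem pv_bucket (w : String → Int) (cs : List String) (v : Int) :
    (cs.foldl (fun d c1 => d.modify (w c1) [] (fun l => l ++ [c1])) PySem.Dict.empty).getD v []
      = cs.filter (fun c => w c == v) := by
  have hmap : cs.foldl (fun d c1 => d.modify (w c1) [] (fun l => l ++ [c1])) PySem.Dict.empty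
      = (cs.map (fun c => (w c, c))).foldl (fun d q => d.modify q.1 [] (fun l => l ++ [q.2])) PySem.Dict.empty := by
    rw [List.foldl_map]
  rw [hmap, PySem.Dict.getD_foldl_modify_append, List.filter_map, List.map_map]
  simp [Function.comp_def]

-- A in canonical form: distinct win counts descending, one filter pass per count
theorem pv_A_canonical (cs : List String) (p : List (String × String × Int)) :
    rank_p_py cs p
      = (PySem.List.sorted (PySem.Set.ofList (cs.map (pvWinsB cs p))) (fun x => x) true).map
          (fun v => cs.filter (fun c => pvWinsB cs p c == v)) := by
  unfold rank_p_py
  simp only [pv_wins_eq]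
  set w := pvWinsB cs p with hw
  set dA := cs.foldl (fun d c1 => d.modify (w c1) [] (fun l => l ++ [c1])) PySem.Dict.empty with hdA
  have hkeysA : dA.keys = PySem.Set.ofList (cs.map w) := by
    rw [hdA, PySem.Dict.keys_foldl_modify_key cs w [] (fun _ c1 => fun l => l ++ [c1])]
    simp [PySem.Set.update, PySem.Set.ofList_eq_foldl, PySem.Dict.keys_empty]
  rw [hkeysA]
  refine List.map_congr_left (fun v _ => ?_)
  rw [hdA, pv_bucket w cs v]

-- B in the same canonical form
theorem pv_B_canonical (cs : List String) (p : List (String × String × Int)) :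
    rank_p_py_alt cs p
      = (PySem.List.sorted (PySem.Set.ofList (cs.map (pvWinsB cs p))) (fun x => x) true).map
          (fun v => cs.filter (fun c => pvWinsB cs p c == v)) := by
  simp only [rank_p_py_alt, Int.toNat_natCast]
  rw [pv_fold_flatten, pv_wins_eq_map]
  refine List.map_congr_left (fun v _ => ?_)
  have hcong : ∀ i ∈ PySem.List.pyRange 0 (cs.length : Int) 1,
      (PySem.List.pyGetD (cs.map (pvWinsB cs p)) i 0 == v) = (pvWinsB cs p (PySem.List.pyGetD cs i "") == v) := by
    intro i hi
    obtain ⟨hi0, hi1⟩ := (PySem.List.mem_pyRange_one).mp hi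
    rw [PySem.List.pyGetD_eq_getElem (cs.map (pvWinsB cs p)) 0 hi0 (by rw [List.length_map]; exact hi1),
      PySem.List.pyGetD_eq_getElem cs "" hi0 hi1, List.getElem_map]
  rw [List.filter_congr hcong]
  have hcomp : (fun i => pvWinsB cs p (PySem.List.pyGetD cs i "") == v)
      = ((fun c => pvWinsB cs p c == v) ∘ (fun i => PySem.List.pyGetD cs i "")) := rfl
  rw [hcomp, ← List.filter_map, PySem.List.map_pyGetD_pyRange_zero' cs ""]

-- ===== VERDICT (by name: the statement is the Claim_ definition above) =====
theorem rank_p_py_spec : Claim_equal_rank_p_py := by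
  intro candidates p _
  unfold Spec_rank_p_py
  rw [pv_A_canonical, pv_B_canonical]
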